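-- pv_equiv track=rewrite | github.com/jayPreak/dsa | google/apr15/A3.py | find_color_order
-- ===== SOURCE A (Python) =====
-- def find_color_order(N, colors):
--     color_dict = {}
--     last_written = {}
--
--     for i, color in enumerate(colors):
--         if color not in color_dict:
--             color_dict[color] = [i]
--         else:
--             color_dict[color].append(i)
--
--     color_order = sorted(color_dict.keys())
--
--     for i in range(len(color_order)):
--         indices = color_dict[color_order[i]]
--         if i == 0:
--             last_written[color_order[i]] = indices[-1]
--         else:
--             prev_color = color_order[i - 1]
--             if indices[0] <= last_written[prev_color]:
--                 return "IMPOSSIBLE"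
--             last_written[color_order[i]] = indices[-1]
--
--     return " ".join(str(color) for color in color_order)
-- ===== SOURCE B (Python) =====
-- def find_color_order(N, colors):
--     if list(colors) != sorted(colors):
--         return "IMPOSSIBLE"
--     return " ".join(str(c) for c in sorted(set(colors)))
-- ===== Notes on version B (the rewrite author's own statement) =====
-- stated objective: simpler
-- what changed: A groups indices per colour in a dict, sorts the distinct colours and checks each colour's index range against a last_written tracker; B replaces all of that with a single test that colors equals sorted(colors) and prints sorted(set(colors)).
import Mathlib
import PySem

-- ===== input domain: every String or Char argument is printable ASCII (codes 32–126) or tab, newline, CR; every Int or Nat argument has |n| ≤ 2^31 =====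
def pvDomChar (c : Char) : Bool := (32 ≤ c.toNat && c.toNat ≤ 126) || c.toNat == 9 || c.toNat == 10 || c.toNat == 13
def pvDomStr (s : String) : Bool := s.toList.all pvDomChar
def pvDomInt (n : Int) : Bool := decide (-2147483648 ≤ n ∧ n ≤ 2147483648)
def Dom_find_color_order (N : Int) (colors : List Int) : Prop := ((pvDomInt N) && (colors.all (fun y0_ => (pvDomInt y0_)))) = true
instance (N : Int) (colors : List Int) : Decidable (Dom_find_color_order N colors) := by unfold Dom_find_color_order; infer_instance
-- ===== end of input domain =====

-- B replaces A's per-colour index bookkeeping (dict of index lists, sorted keys, last_written range checks)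
-- by a single monotonicity test 'colors == sorted(colors)' plus printing sorted(set(colors)); objective: simpler.

-- ===== PORT A =====
-- A's second loop 'for i in range(len(color_order)):' with its early return "IMPOSSIBLE"
-- (fuel = number of loop iterations left, order.length at the call site; it only makes the recursion structural)
def pvALoop (cd : PySem.Dict Int (List Int)) (order : List Int) : PySem.Dict Int Int → Nat → Nat → String
  | _lw, _i, 0 => PySem.Str.join " " (order.map PySem.Int.toStr)
  | lw, i, fuel + 1 =>
    if h : i < order.length then
      let indices := cd.getD (order[i]'h) []
      if i = 0 then
        pvALoop cd order (lw.insert (order[i]'h) (PySem.List.pyGetD indices (-1) 0)) (i + 1) fuel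
      else
        let prev_color := order[i - 1]'(by omega)
        if PySem.List.pyGetD indices 0 0 ≤ lw.getD prev_color 0 then "IMPOSSIBLE"
        else pvALoop cd order (lw.insert (order[i]'h) (PySem.List.pyGetD indices (-1) 0)) (i + 1) fuel
    else
      PySem.Str.join " " (order.map PySem.Int.toStr)

def find_color_order (N : Int) (colors : List Int) : String :=
  let color_dict : PySem.Dict Int (List Int) :=
    (PySem.List.enumerate colors).foldl
      (fun d p =>
        if d.contains p.2 = false then d.insert p.2 [p.1]
        else d.modify p.2 [] (fun l => l ++ [p.1]))
      PySem.Dict.empty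
  let color_order := PySem.List.sorted color_dict.keys (fun c => c)
  pvALoop color_dict color_order PySem.Dict.empty 0 color_order.length

-- ===== PORT B =====
def find_color_order_alt (N : Int) (colors : List Int) : String :=
  if colors ≠ PySem.List.sorted colors (fun c => c) then "IMPOSSIBLE"
  else PySem.Str.join " "
    ((PySem.List.sorted (PySem.Set.ofList colors) (fun c => c)).map PySem.Int.toStr)

-- ===== PRECONDITION & SPEC =====
def Spec_find_color_order (N : Int) (colors : List Int) (out : String) : Prop := out = find_color_order_alt N colors
instance (N : Int) (colors : List Int) (out : String) : Decidable (Spec_find_color_order N colors out) := by unfold Spec_find_color_order; infer_instance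

-- ===== CLAIM (what is proved, stated in full; the proofs are below) =====
def Claim_equal_find_color_order : Prop := ∀ (N : Int) (colors : List Int), Dom_find_color_order N colors → Spec_find_color_order N colors (find_color_order N colors)

-- ===== LEMMAS AND PROOFS =====
def pvIdx (colors : List Int) (c : Int) : List Int :=
  ((PySem.List.enumerate colors).filter (fun p => p.2 == c)).map (fun p => p.1)

lemma mem_pvIdx {colors : List Int} {c i : Int} :
    i ∈ pvIdx colors c ↔ ∃ (k : Nat) (h : k < colors.length), colors[k] = c ∧ i = (k : Int) := by
  simp only [pvIdx, List.mem_map, List.mem_filter, PySem.List.mem_enumerate_iff]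
  constructor
  · rintro ⟨p, ⟨⟨k, hk, rfl⟩, hc⟩, rfl⟩
    exact ⟨k, hk, by simpa using hc, by simp⟩
  · rintro ⟨k, hk, hc, rfl⟩
    exact ⟨(k, colors[k]), ⟨⟨k, hk, by simp⟩, by simpa using hc⟩, rfl⟩

lemma pairwise_pvIdx (colors : List Int) (c : Int) : (pvIdx colors c).Pairwise (· < ·) := by
  refine List.Pairwise.map _ (fun a b h => h) ?_
  exact (PySem.List.pairwise_lt_enumerate colors 0).filter _

def pvFst (colors : List Int) (c : Int) : Int := PySem.List.pyGetD (pvIdx colors c) 0 0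
def pvLst (colors : List Int) (c : Int) : Int := PySem.List.pyGetD (pvIdx colors c) (-1) 0

lemma pvIdx_ne_nil {colors : List Int} {c : Int} (h : c ∈ colors) : pvIdx colors c ≠ [] := by
  obtain ⟨k, hk, rfl⟩ := List.mem_iff_getElem.mp h
  have : (k : Int) ∈ pvIdx colors colors[k] := mem_pvIdx.mpr ⟨k, hk, rfl, rfl⟩
  exact List.ne_nil_of_mem this

lemma pvFst_eq {colors : List Int} {c : Int} (h : c ∈ colors) :
    pvFst colors c = (pvIdx colors c)[0]'(by simpa [List.length_pos_iff] using pvIdx_ne_nil h) := by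
  have hne := pvIdx_ne_nil h
  have hlen : 0 < (pvIdx colors c).length := by simpa [List.length_pos_iff] using hne
  simp [pvFst, PySem.List.pyGetD_zero, List.getD_eq_getElem?_getD, List.getElem?_eq_getElem hlen]

lemma pvLst_eq {colors : List Int} {c : Int} (h : c ∈ colors) :
    pvLst colors c = (pvIdx colors c)[(pvIdx colors c).length - 1]'(by
      have := pvIdx_ne_nil h; simp [List.length_pos_iff]; omega) := by
  have hne := pvIdx_ne_nil h
  rw [pvLst, PySem.List.pyGetD_neg_one _ _ hne, List.getLast_eq_getElem]

lemma pvFst_mem {colors : List Int} {c : Int} (h : c ∈ colors) : pvFst colors c ∈ pvIdx colors c := by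
  rw [pvFst_eq h]; exact List.getElem_mem _

lemma pvLst_mem {colors : List Int} {c : Int} (h : c ∈ colors) : pvLst colors c ∈ pvIdx colors c := by
  rw [pvLst_eq h]; exact List.getElem_mem _

lemma pvFst_le_le_pvLst {colors : List Int} {c : Int} (h : c ∈ colors) :
    ∀ i ∈ pvIdx colors c, pvFst colors c ≤ i ∧ i ≤ pvLst colors c := by
  intro i hi
  obtain ⟨k, hk, rfl⟩ := List.mem_iff_getElem.mp hi
  have hp := List.pairwise_iff_getElem.mp (pairwise_pvIdx colors c)
  rw [pvFst_eq h, pvLst_eq h]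
  constructor
  · rcases Nat.eq_zero_or_pos k with rfl | hk0
    · exact le_refl _
    · exact le_of_lt (hp 0 k (by omega) hk hk0)
  · rcases eq_or_lt_of_le (Nat.le_sub_one_of_lt hk) with heq | hlt
    · exact le_of_eq (by congr 1)
    · exact le_of_lt (hp k _ hk (by omega) hlt)

lemma colors_getElem_mem_pvIdx {colors : List Int} {k : Nat} (hk : k < colors.length) :
    (k : Int) ∈ pvIdx colors colors[k] := mem_pvIdx.mpr ⟨k, hk, rfl, rfl⟩

lemma lst_lt_fst_of_sorted {colors : List Int} (hs : colors.Pairwise (· ≤ ·))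
    {a b : Int} (ha : a ∈ colors) (hb : b ∈ colors) (hab : a < b) :
    pvLst colors a < pvFst colors b := by
  obtain ⟨k1, hk1, hc1, he1⟩ := mem_pvIdx.mp (pvLst_mem ha)
  obtain ⟨k2, hk2, hc2, he2⟩ := mem_pvIdx.mp (pvFst_mem hb)
  rw [he1, he2]
  have hps := List.pairwise_iff_getElem.mp hs
  by_contra hle
  have hk21 : k2 ≤ k1 := by exact_mod_cast not_lt.mp hle
  rcases eq_or_lt_of_le hk21 with heq | hlt
  · subst heq; rw [hc1] at hc2; omega
  · have := hps k2 k1 hk2 hk1 hlt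
    rw [hc1, hc2] at this; omega

lemma pairwise_of_good {colors order : List Int}
    (horder : order.Pairwise (· < ·))
    (hmem : ∀ c, c ∈ order ↔ c ∈ colors)
    (hgood : ∀ j : Nat, 0 < j → (hj : j < order.length) →
      pvLst colors (order[j - 1]'(by omega)) < pvFst colors (order[j]'hj)) :
    colors.Pairwise (· ≤ ·) := by
  have hpo := List.pairwise_iff_getElem.mp horder
  -- each colour's first occurrence is ≤ its last occurrence
  have hfl : ∀ c ∈ colors, pvFst colors c ≤ pvLst colors c := fun c hc =>
    le_trans ((pvFst_le_le_pvLst hc _ (pvFst_mem hc)).1) ((pvFst_le_le_pvLst hc _ (pvFst_mem hc)).2)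
  -- chain: p < q in order ⇒ last of order[p] < first of order[q]
  have hchain : ∀ q (hq : q < order.length) p (hp : p < q),
      pvLst colors (order[p]'(by omega)) < pvFst colors (order[q]'hq) := by
    intro q
    induction q with
    | zero => omega
    | succ q ih =>
      intro hq p hp
      rcases eq_or_lt_of_le (Nat.le_of_lt_succ hp) with heq | hlt
      · subst heq
        have := hgood (p + 1) (by omega) hq
        simpa using this
      · have h1 := ih (by omega) p hlt
        have h2 := hgood (q + 1) (by omega) hq
        have h3 := hfl (order[q]'(by omega)) ((hmem _).mp (List.getElem_mem _))
        have h4 : pvLst colors (order[q]'(by omega)) < pvFst colors (order[q+1]'hq) := by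
          simpa using h2
        omega
  rw [List.pairwise_iff_getElem]
  intro k1 k2 hk1 hk2 hlt
  by_contra hgt
  push Not at hgt
  set a := colors[k2]
  set b := colors[k1]
  obtain ⟨p, hp, hpa⟩ := List.mem_iff_getElem.mp ((hmem a).mpr (List.getElem_mem _))
  obtain ⟨q, hq, hqb⟩ := List.mem_iff_getElem.mp ((hmem b).mpr (List.getElem_mem _))
  have hpq : p < q := by
    rcases lt_trichotomy p q with h | h | h
    · exact h
    · subst h; rw [hpa] at hqb; omega
    · have := hpo q p hq hp h; rw [hpa, hqb] at this; omega
  have hch := hchain q hq p hpq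
  rw [hpa, hqb] at hch
  have h5 := (pvFst_le_le_pvLst (show a ∈ colors from List.getElem_mem _) _ (colors_getElem_mem_pvIdx hk2)).2
  have h6 := (pvFst_le_le_pvLst (show b ∈ colors from List.getElem_mem _) _ (colors_getElem_mem_pvIdx hk1)).1
  -- k2 ≤ lst a < fst b ≤ k1, contradicting k1 < k2
  have : (k2 : Int) < (k1 : Int) := by
    calc (k2:Int) ≤ pvLst colors a := h5
    _ < pvFst colors b := hch
    _ ≤ (k1:Int) := h6
  omega

def pvCD (colors : List Int) : PySem.Dict Int (List Int) :=
  (PySem.List.enumerate colors).foldl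
    (fun d p =>
      if d.contains p.2 = false then d.insert p.2 [p.1]
      else d.modify p.2 [] (fun l => l ++ [p.1]))
    PySem.Dict.empty

lemma pvCD_step : (fun (d : PySem.Dict Int (List Int)) (p : Int × Int) =>
      if d.contains p.2 = false then d.insert p.2 [p.1] else d.modify p.2 [] (fun l => l ++ [p.1]))
    = fun d p => d.modify p.2 [] (fun l => l ++ [p.1]) := by
  funext d p
  by_cases h : d.contains p.2
  · simp [h]
  · simp only [Bool.not_eq_true] at h
    simp only [h]
    show d.insert p.2 [p.1] = d.insert p.2 ((d.getD p.2 []) ++ [p.1])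
    rw [PySem.Dict.getD_of_not_contains _ _ h]
    rfl

lemma pvCD_eq (colors : List Int) : pvCD colors =
    ((PySem.List.enumerate colors).map Prod.swap).foldl
      (fun d q => d.modify q.1 [] (fun l => l ++ [q.2])) PySem.Dict.empty := by
  rw [pvCD, pvCD_step, List.foldl_map]
  rfl

lemma pvCD_getD (colors : List Int) (c : Int) : (pvCD colors).getD c [] = pvIdx colors c := by
  rw [pvCD_eq, PySem.Dict.getD_foldl_modify_append]
  simp [pvIdx, List.filter_map, List.map_map, Function.comp_def, Prod.swap]

lemma pvCD_keys (colors : List Int) : (pvCD colors).keys = PySem.Set.ofList colors := by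
  rw [pvCD, pvCD_step]
  rw [PySem.Dict.keys_foldl_modify_key (PySem.List.enumerate colors) (fun p => p.2) [] (fun d p l => l ++ [p.1]) PySem.Dict.empty]
  simp [PySem.List.map_snd_enumerate]
  rfl



lemma pyGetD_neg_one_pvCD (colors : List Int) (c : Int) :
    PySem.List.pyGetD ((pvCD colors).getD c []) (-1) 0 = pvLst colors c := by
  rw [pvCD_getD]; rfl

lemma pyGetD_zero_pvCD (colors : List Int) (c : Int) :
    PySem.List.pyGetD ((pvCD colors).getD c []) 0 0 = pvFst colors c := by
  rw [pvCD_getD]; rfl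

lemma pvALoop_ok (colors : List Int) (order : List Int)
    (hgood : ∀ j : Nat, 0 < j → (hj : j < order.length) →
      pvLst colors (order[j - 1]'(by omega)) < pvFst colors (order[j]'hj)) :
    ∀ (n i : Nat) (lw : PySem.Dict Int Int), order.length - i = n →
    (∀ (hi : 0 < i) (hi' : i - 1 < order.length),
        lw.getD (order[i - 1]'hi') 0 = pvLst colors (order[i - 1]'hi')) →
    pvALoop (pvCD colors) order lw i n = PySem.Str.join " " (order.map PySem.Int.toStr) := by
  intro n
  induction n with
  | zero =>
    intro i lw hn _
    rfl
  | succ n ih =>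
    intro i lw hn hlw
    have hi : i < order.length := by omega
    rw [pvALoop, dif_pos hi]
    simp only
    rcases Nat.eq_zero_or_pos i with rfl | hpos
    · rw [if_pos rfl]
      apply ih (0 + 1) _ (by omega)
      intro _ hi'
      simp only [Nat.add_sub_cancel]
      rw [pyGetD_neg_one_pvCD, PySem.Dict.getD_insert_self]
    · rw [if_neg (by omega)]
      have hread := hlw hpos (by omega)
      rw [pyGetD_zero_pvCD, hread, if_neg (by push Not; exact hgood i hpos hi)]
      apply ih (i + 1) _ (by omega)
      intro _ hi'
      simp only [Nat.add_sub_cancel]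
      rw [pyGetD_neg_one_pvCD, PySem.Dict.getD_insert_self]

lemma pvALoop_bad (colors : List Int) (order : List Int)
    {j : Nat} (hj0 : 0 < j) (hj : j < order.length)
    (hviol : pvFst colors (order[j]'hj) ≤ pvLst colors (order[j - 1]'(by omega))) :
    ∀ (n i : Nat) (lw : PySem.Dict Int Int), order.length - i = n → i ≤ j →
    (∀ (hi : 0 < i) (hi' : i - 1 < order.length),
        lw.getD (order[i - 1]'hi') 0 = pvLst colors (order[i - 1]'hi')) →
    pvALoop (pvCD colors) order lw i n = "IMPOSSIBLE" := by
  intro n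
  induction n with
  | zero => intro i lw hn hij _; omega
  | succ n ih =>
    intro i lw hn hij hlw
    have hi : i < order.length := by omega
    rw [pvALoop, dif_pos hi]
    simp only
    rcases Nat.eq_zero_or_pos i with rfl | hpos
    · rw [if_pos rfl]
      apply ih (0 + 1) _ (by omega) (by omega)
      intro _ hi'
      simp only [Nat.add_sub_cancel]
      rw [pyGetD_neg_one_pvCD, PySem.Dict.getD_insert_self]
    · rw [if_neg (by omega)]
      have hread := hlw hpos (by omega)
      rw [pyGetD_zero_pvCD, hread]
      by_cases hguard : pvFst colors (order[i]'hi) ≤ pvLst colors (order[i-1]'(by omega))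
      · rw [if_pos hguard]
      · rw [if_neg hguard]
        have hij' : i + 1 ≤ j := by
          rcases eq_or_lt_of_le hij with heq | hlt
          · subst heq; exact absurd hviol hguard
          · omega
        apply ih (i + 1) _ (by omega) hij'
        intro _ hi'
        simp only [Nat.add_sub_cancel]
        rw [pyGetD_neg_one_pvCD, PySem.Dict.getD_insert_self]

lemma find_color_order_eq_alt (N : Int) (colors : List Int) :
    find_color_order N colors = find_color_order_alt N colors := by
  have hA : find_color_order N colors =
      pvALoop (pvCD colors) (PySem.List.sorted (PySem.Set.ofList colors) (fun c => c))
        PySem.Dict.empty 0 (PySem.List.sorted (PySem.Set.ofList colors) (fun c => c)).length := by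
    show pvALoop (pvCD colors) (PySem.List.sorted (pvCD colors).keys (fun c => c))
        PySem.Dict.empty 0 (PySem.List.sorted (pvCD colors).keys (fun c => c)).length = _
    rw [pvCD_keys]
  set order := PySem.List.sorted (PySem.Set.ofList colors) (fun c => c) with horderdef
  have horder : order.Pairwise (· < ·) := PySem.List.sorted_ofList_pairwise_lt colors
  have hmem : ∀ c, c ∈ order ↔ c ∈ colors := by
    intro c
    rw [horderdef, PySem.List.mem_sorted]
    exact PySem.Set.mem_ofList (xs := colors) (y := c)
  by_cases hs : colors.Pairwise (· ≤ ·)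
  · have hB : find_color_order_alt N colors = PySem.Str.join " " (order.map PySem.Int.toStr) := by
      rw [find_color_order_alt, if_neg (by
        simp only [ne_eq, not_not]
        exact (PySem.List.sorted_eq_self_of_pairwise colors (fun c => c) hs).symm)]
    rw [hA, hB]
    apply pvALoop_ok colors order _ order.length 0 _ (by omega) (by omega)
    intro j hj0 hj
    have hpo := List.pairwise_iff_getElem.mp horder
    exact lst_lt_fst_of_sorted hs ((hmem _).mp (List.getElem_mem _))
      ((hmem _).mp (List.getElem_mem _)) (hpo (j-1) j (by omega) hj (by omega))
  · have hB : find_color_order_alt N colors = "IMPOSSIBLE" := by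
      rw [find_color_order_alt, if_pos]
      intro heq
      exact hs (by
        have := PySem.List.sorted_pairwise colors (fun c => c)
        rwa [← heq] at this)
    rw [hA, hB]
    have hnall : ¬ ∀ j : Nat, 0 < j → (hj : j < order.length) →
        pvLst colors (order[j - 1]'(by omega)) < pvFst colors (order[j]'hj) :=
      fun hgood => hs (pairwise_of_good horder hmem hgood)
    push Not at hnall
    obtain ⟨j, hj0, hj, hviol⟩ := hnall
    exact pvALoop_bad colors order hj0 hj hviol order.length 0 _ (by omega) (by omega) (by omega)

-- ===== VERDICT (by name: the statement is the Claim_ definition above) =====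
theorem find_color_order_spec : Claim_equal_find_color_order := by
  intro N colors _
  exact find_color_order_eq_alt N colors
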